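-- pv_equiv track=rewrite | github.com/abailoni/greedy_CNN | greedyNET/nets/greedyLayer.py | get_output_shape_for
-- ===== SOURCE A (Python) =====
-- def get_output_shape_for(input_shapes):
--     if len(input_shapes)!=2:
--         raise ValueError("Two layers need to be passed as input")
--
--     # input_shapes = autocrop_array_shapes(input_shapes, self.cropping)
--     # Infer the output shape by grabbing, for each axis, the first
--     # input size that is not `None` (if there is any)
--     output_shape = tuple(next((s for s in sizes if s is not None), None)
--                          for sizes in zip(*input_shapes))
--
--     def match(shape1, shape2):
--         return (len(shape1) == len(shape2) and
--                 all(s1 is None or s2 is None or s1 == s2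
--                     for s1, s2 in zip(shape1, shape2)))
--
--     # Check for compatibility with inferred output shape
--     if not all(match(shape, output_shape) for shape in input_shapes):
--         raise ValueError("Mismatch: not all input shapes are the same")
--     return output_shape
-- ===== SOURCE B (Python) =====
-- def get_output_shape_for(input_shapes):
--     if len(input_shapes) != 2:
--         raise ValueError("Two layers need to be passed as input")
--     shape1, shape2 = input_shapes
--     if len(shape1) != len(shape2):
--         raise ValueError("Mismatch: not all input shapes are the same")
--     output = []
--     for s1, s2 in zip(shape1, shape2):
--         if s1 is not None and s2 is not None and s1 != s2:
--             raise ValueError("Mismatch: not all input shapes are the same")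
--         output.append(s1 if s1 is not None else s2)
--     return tuple(output)
-- ===== Notes on version B (the rewrite author's own statement) =====
-- stated objective: simpler
-- what changed: Replaces A's build-then-validate (a zip(*...) inference pass followed by a match() check of every input shape against the inferred tuple) with one fused loop over zip(shape1, shape2) that validates each axis pair and emits the merged size in the same step, plus an explicit length check replacing the implicit zip-truncation failure.
import Mathlib
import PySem

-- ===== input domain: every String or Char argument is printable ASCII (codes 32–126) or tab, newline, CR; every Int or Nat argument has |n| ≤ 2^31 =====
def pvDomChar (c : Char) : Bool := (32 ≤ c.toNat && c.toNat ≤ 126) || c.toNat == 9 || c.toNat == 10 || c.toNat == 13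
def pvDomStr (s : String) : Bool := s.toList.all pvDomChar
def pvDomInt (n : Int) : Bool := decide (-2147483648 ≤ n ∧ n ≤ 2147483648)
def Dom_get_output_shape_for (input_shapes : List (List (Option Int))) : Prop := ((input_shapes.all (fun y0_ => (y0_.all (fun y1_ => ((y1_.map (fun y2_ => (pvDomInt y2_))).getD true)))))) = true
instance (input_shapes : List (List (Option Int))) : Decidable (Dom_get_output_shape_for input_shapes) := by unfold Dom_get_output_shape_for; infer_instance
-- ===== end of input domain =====

-- B fuses A's two passes (infer via zip(*shapes), then validate each shape with match())
-- into one loop over zip(shape1, shape2); return-value equivalence on Pre_ (where A returns).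

-- ===== PORT A =====
-- output_shape = tuple(next((s for s in sizes if s is not None), None) for sizes in zip(*input_shapes))
def pvInferA (sh1 sh2 : List (Option Int)) : List (Option Int) :=
  (List.zip sh1 sh2).map (fun p => if p.1.isSome then p.1 else p.2)

-- def match(shape1, shape2): len equal and all pairs compatible
def pvMatchA (shape1 shape2 : List (Option Int)) : Bool :=
  (shape1.length == shape2.length) &&
    (List.zip shape1 shape2).all (fun p => p.1 == none || p.2 == none || p.1 == p.2)

def get_output_shape_for (input_shapes : List (List (Option Int))) : List (Option Int) :=
  -- if len(input_shapes)!=2: raise ValueError(...)  -- excluded by Pre_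
  if input_shapes.length ≠ 2 then []
  else
    let sh1 := input_shapes.headD []
    let sh2 := (input_shapes.drop 1).headD []
    let output_shape := pvInferA sh1 sh2
    if input_shapes.all (fun sh => pvMatchA sh output_shape) then output_shape
    else []  -- raise ValueError("Mismatch: not all input shapes are the same"); excluded by Pre_

-- ===== PORT B =====
-- fused loop: raise on an incompatible pair, else append s1 if s1 is not None else s2
def pvFuseB : List (Option Int) → List (Option Int) → Option (List (Option Int))
  | s1 :: t1, s2 :: t2 =>
    if s1.isSome && s2.isSome && s1 != s2 then none  -- raise ValueError
    else (pvFuseB t1 t2).map (fun rest => (if s1.isSome then s1 else s2) :: rest)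
  | _, _ => some []

def get_output_shape_for_alt (input_shapes : List (List (Option Int))) : List (Option Int) :=
  match input_shapes with
  | [sh1, sh2] =>
    if sh1.length != sh2.length then []  -- raise ValueError; excluded by Pre_
    else (pvFuseB sh1 sh2).getD []       -- none = raise ValueError; excluded by Pre_
  | _ => []  -- raise ValueError; excluded by Pre_

-- ===== PRECONDITION & SPEC =====
-- Pre_: exactly the inputs where A returns normally: exactly two shapes, of equal length,
-- with no axis where both sizes are given and differ (otherwise A raises ValueError).
def Pre_get_output_shape_for (input_shapes : List (List (Option Int))) : Prop :=
  input_shapes.length = 2 ∧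
  (input_shapes.headD []).length = ((input_shapes.drop 1).headD []).length ∧
  (List.zip (input_shapes.headD []) ((input_shapes.drop 1).headD [])).all
    (fun p => p.1 == none || p.2 == none || p.1 == p.2) = true
instance (input_shapes : List (List (Option Int))) : Decidable (Pre_get_output_shape_for input_shapes) := by
  unfold Pre_get_output_shape_for; infer_instance

def pvWitness_get_output_shape_for : List (List (Option Int)) := [[some 3, none, some 5], [none, some 4, some 5]]

def Spec_get_output_shape_for (input_shapes : List (List (Option Int))) (out : List (Option Int)) : Prop := out = get_output_shape_for_alt input_shapes
instance (input_shapes : List (List (Option Int))) (out : List (Option Int)) : Decidable (Spec_get_output_shape_for input_shapes out) := by unfold Spec_get_output_shape_for; infer_instance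

-- ===== CLAIM (what is proved, stated in full; the proofs are below) =====
def Claim_equal_get_output_shape_for : Prop := ∀ (input_shapes : List (List (Option Int))), Dom_get_output_shape_for input_shapes → Pre_get_output_shape_for input_shapes → Spec_get_output_shape_for input_shapes (get_output_shape_for input_shapes)

-- ===== LEMMAS AND PROOFS =====

-- Under compatibility, B's fused loop returns exactly A's inferred shape.
lemma pvFuseB_eq_infer (sh1 sh2 : List (Option Int))
    (hc : (List.zip sh1 sh2).all (fun p => p.1 == none || p.2 == none || p.1 == p.2) = true) :
    pvFuseB sh1 sh2 = some (pvInferA sh1 sh2) := by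
  induction sh1 generalizing sh2 with
  | nil => cases sh2 <;> simp [pvFuseB, pvInferA]
  | cons s1 t1 ih =>
    cases sh2 with
    | nil => simp [pvFuseB, pvInferA]
    | cons s2 t2 =>
      simp only [List.zip_cons_cons, List.all_cons, Bool.and_eq_true] at hc
      obtain ⟨h1, h2⟩ := hc
      have hne : (s1.isSome && s2.isSome && s1 != s2) = false := by
        cases s1 <;> cases s2 <;> simp_all
      simp [pvFuseB, pvInferA, hne, ih t2 h2]

-- Under equal lengths and compatibility, A's match check passes for both shapes.
lemma pvMatchA_self (sh1 sh2 : List (Option Int)) (hl : sh1.length = sh2.length)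
    (hc : (List.zip sh1 sh2).all (fun p => p.1 == none || p.2 == none || p.1 == p.2) = true) :
    pvMatchA sh1 (pvInferA sh1 sh2) = true ∧ pvMatchA sh2 (pvInferA sh1 sh2) = true := by
  induction sh1 generalizing sh2 with
  | nil => cases sh2 <;> simp_all [pvMatchA, pvInferA]
  | cons s1 t1 ih =>
    cases sh2 with
    | nil => simp at hl
    | cons s2 t2 =>
      simp only [List.zip_cons_cons, List.all_cons, Bool.and_eq_true] at hc
      obtain ⟨h1, h2⟩ := hc
      simp only [List.length_cons, Nat.add_right_cancel_iff] at hl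
      obtain ⟨ihA, ihB⟩ := ih t2 hl h2
      unfold pvMatchA pvInferA at *
      simp_all
      constructor
      · cases s1 <;> simp_all
      · cases s1 <;> cases s2 <;> simp_all

-- ===== VERDICT (by name: the statement is the Claim_ definition above) =====
theorem get_output_shape_for_spec : Claim_equal_get_output_shape_for := by
  intro input_shapes _ hpre
  unfold Spec_get_output_shape_for
  obtain ⟨hlen, hl, hc⟩ := hpre
  match input_shapes, hlen with
  | [sh1, sh2], _ =>
    simp only [List.headD, List.drop] at hl hc
    obtain ⟨hm1, hm2⟩ := pvMatchA_self sh1 sh2 hl hc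
    simp [get_output_shape_for, get_output_shape_for_alt, hl,
      pvFuseB_eq_infer sh1 sh2 hc, hm1, hm2]
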